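-- pv_equiv track=rewrite | github.com/vschellervidal/geneweb_python | code/src/geneweb/domain/gedcom_normalizer.py | _normalize_head_order
-- ===== SOURCE A (Python) =====
-- def _normalize_head_order(lines: list[str]) -> list[str]:
--     """Normalise l'ordre des champs dans la section HEAD.
--
--     Args:
--         lines: Lignes GEDCOM
--
--     Returns:
--         Lignes avec ordre HEAD normalisé
--     """
--     if not lines or not lines[0].startswith("0 HEAD"):
--         return lines
--
--     # Trouver la section HEAD
--     head_start = 0
--     head_end = len(lines)
--
--     for i, line in enumerate(lines[1:], 1):
--         if line.startswith("0 "):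
--             head_end = i
--             break
--
--     # Extraire et réorganiser les champs HEAD
--     head_lines = lines[head_start:head_end]
--     head_line = head_lines[0]  # "0 HEAD"
--     head_fields = head_lines[1:]  # Champs 1 CHAR, 1 SOUR, etc.
--
--     # Ordre préféré pour les champs HEAD
--     preferred_order = [
--         "1 CHAR",
--         "1 SOUR",
--         "1 SUBM",
--         "1 DEST",
--         "1 DATE",
--         "1 FILE",
--         "1 GEDC",
--         "1 LANG",
--         "1 PLAC",
--         "1 NOTE",
--     ]
--
--     # Réorganiser selon l'ordre préféré
--     ordered_fields = []
--     remaining_fields = head_fields.copy()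
--
--     for pattern in preferred_order:
--         for field in remaining_fields[:]:
--             if field.startswith(pattern):
--                 ordered_fields.append(field)
--                 remaining_fields.remove(field)
--
--     # Ajouter les champs restants non reconnus
--     ordered_fields.extend(remaining_fields)
--
--     # Reconstruire les lignes
--     result = lines[:head_start]
--     result.append(head_line)
--     result.extend(ordered_fields)
--     result.extend(lines[head_end:])
--
--     return result
-- ===== SOURCE B (Python) =====
-- def _normalize_head_order(lines: list[str]) -> list[str]:
--     """One-pass bucket grouping of HEAD fields by first matching preferred pattern."""
--     if not lines or not lines[0].startswith("0 HEAD"):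
--         return lines
--
--     head_end = len(lines)
--     for i, line in enumerate(lines[1:], 1):
--         if line.startswith("0 "):
--             head_end = i
--             break
--
--     preferred_order = [
--         "1 CHAR",
--         "1 SOUR",
--         "1 SUBM",
--         "1 DEST",
--         "1 DATE",
--         "1 FILE",
--         "1 GEDC",
--         "1 LANG",
--         "1 PLAC",
--         "1 NOTE",
--     ]
--
--     # One pass over the HEAD fields: put each field in the bucket of its
--     # first matching pattern, or in `unknown` when none matches.
--     buckets = [[] for _ in preferred_order]
--     unknown = []
--     for field in lines[1:head_end]:
--         for j, pattern in enumerate(preferred_order):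
--             if field.startswith(pattern):
--                 buckets[j].append(field)
--                 break
--         else:
--             unknown.append(field)
--
--     result = [lines[0]]
--     for bucket in buckets:
--         result.extend(bucket)
--     result.extend(unknown)
--     result.extend(lines[head_end:])
--     return result
-- ===== Notes on version B (the rewrite author's own statement) =====
-- stated objective: alternative
-- what changed: Replaces A's nested per-pattern rescans of the remaining-fields list (with list.remove inside the inner loop) by a single grouping pass that drops each HEAD field into the bucket of its first matching preferred pattern (or an unknown list), then emits the buckets in preferred order.
import Mathlib
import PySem

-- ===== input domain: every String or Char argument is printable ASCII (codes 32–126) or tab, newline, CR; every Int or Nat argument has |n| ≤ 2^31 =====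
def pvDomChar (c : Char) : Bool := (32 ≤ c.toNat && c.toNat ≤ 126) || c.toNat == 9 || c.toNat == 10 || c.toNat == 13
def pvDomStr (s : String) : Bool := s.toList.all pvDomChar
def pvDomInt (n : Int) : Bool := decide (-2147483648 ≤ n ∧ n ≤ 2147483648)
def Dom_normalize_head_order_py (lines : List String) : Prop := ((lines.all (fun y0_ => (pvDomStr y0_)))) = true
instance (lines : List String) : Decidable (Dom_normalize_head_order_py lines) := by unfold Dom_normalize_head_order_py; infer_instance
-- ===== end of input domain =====

-- B replaces A's per-pattern repeated scans with `remove` by a single bucket-grouping pass over the HEAD fields; objective: alternative decomposition (one-pass grouping), same observable result.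

-- the preferred_order literal, shared data of both Pythons
def pvPreferred : List String :=
  ["1 CHAR", "1 SOUR", "1 SUBM", "1 DEST", "1 DATE",
   "1 FILE", "1 GEDC", "1 LANG", "1 PLAC", "1 NOTE"]

-- ===== PORT A =====
-- the `for i, line in enumerate(lines[1:], 1): if line.startswith("0 "): head_end = i; break` loop
def pvA_findEnd : List String → Nat → Nat → Nat
  | [], _, dflt => dflt
  | l :: ls, i, dflt => if PySem.Str.startswith l "0 " then i else pvA_findEnd ls (i + 1) dflt

-- inner loop: `for field in remaining_fields[:]:` with append/remove; first arg of the recursion is the snapshot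
def pvA_inner (pat : String) : List String → List String → List String → List String × List String
  | [], ord, rem => (ord, rem)
  | f :: fs, ord, rem =>
    if PySem.Str.startswith f pat then
      -- `remaining_fields.remove(field)` never raises here; getD's default is unreachable
      pvA_inner pat fs (ord ++ [f]) ((PySem.List.remove? rem f).getD rem)
    else
      pvA_inner pat fs ord rem

-- outer loop: `for pattern in preferred_order:`
def pvA_outer : List String → List String → List String → List String × List String
  | [], ord, rem => (ord, rem)
  | p :: ps, ord, rem =>
    let s := pvA_inner p rem ord rem
    pvA_outer ps s.1 s.2

def normalize_head_order_py (lines : List String) : List String :=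
  match lines with
  | [] => lines
  | l0 :: _ =>
    if !PySem.Str.startswith l0 "0 HEAD" then lines
    else
      let head_start : Nat := 0
      let head_end : Nat := pvA_findEnd (PySem.List.slice lines (some 1) none) 1 lines.length
      let head_lines := PySem.List.slice lines (some (head_start : Int)) (some (head_end : Int))
      -- head_lines[0]: head_lines is never empty here, the default is unreachable
      let head_line := (PySem.List.pyGet? head_lines 0).getD ""
      let head_fields := PySem.List.slice head_lines (some 1) none
      let s := pvA_outer pvPreferred [] head_fields
      let ordered_fields := s.1 ++ s.2
      PySem.List.slice lines none (some (head_start : Int)) ++ [head_line] ++ ordered_fields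
        ++ PySem.List.slice lines (some (head_end : Int)) none

-- ===== PORT B =====
-- same boundary loop as in Source B
def pvB_findEnd : List String → Nat → Nat → Nat
  | [], _, dflt => dflt
  | l :: ls, i, dflt => if PySem.Str.startswith l "0 " then i else pvB_findEnd ls (i + 1) dflt

-- `for j, pattern in enumerate(preferred_order): if field.startswith(pattern): … break`
def pvB_firstIdx : List String → String → Nat → Option Nat
  | [], _, _ => none
  | p :: ps, f, j => if PySem.Str.startswith f p then some j else pvB_firstIdx ps f (j + 1)

-- the single grouping pass: buckets (list of lists) plus the unknown list
def pvB_group (ps : List String) : List String → List (List String) → List String → List (List String) × List String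
  | [], bks, unk => (bks, unk)
  | f :: fs, bks, unk =>
    match pvB_firstIdx ps f 0 with
    | some j => pvB_group ps fs (bks.set j (bks.getD j [] ++ [f])) unk
    | none => pvB_group ps fs bks (unk ++ [f])

def normalize_head_order_py_alt (lines : List String) : List String :=
  match lines with
  | [] => lines
  | l0 :: _ =>
    if !PySem.Str.startswith l0 "0 HEAD" then lines
    else
      let head_end : Nat := pvB_findEnd (PySem.List.slice lines (some 1) none) 1 lines.length
      let buckets0 : List (List String) := pvPreferred.map (fun _ => [])
      let s := pvB_group pvPreferred (PySem.List.slice lines (some 1) (some (head_end : Int))) buckets0 []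
      -- `result = [lines[0]]; for bucket in buckets: result.extend(bucket)`
      (s.1.foldl (fun r b => r ++ b) [l0]) ++ s.2 ++ PySem.List.slice lines (some (head_end : Int)) none

-- ===== PRECONDITION & SPEC =====
def Spec_normalize_head_order_py (lines : List String) (out : List String) : Prop := out = normalize_head_order_py_alt lines
instance (lines : List String) (out : List String) : Decidable (Spec_normalize_head_order_py lines out) := by unfold Spec_normalize_head_order_py; infer_instance

-- ===== CLAIM (what is proved, stated in full; the proofs are below) =====
def Claim_equal_normalize_head_order_py : Prop := ∀ (lines : List String), Dom_normalize_head_order_py lines → Spec_normalize_head_order_py lines (normalize_head_order_py lines)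

-- ===== LEMMAS AND PROOFS =====

-- the two boundary loops are the same code
theorem pv_findEnd_eq : ∀ (ls : List String) (i d : Nat), pvA_findEnd ls i d = pvB_findEnd ls i d := by
  intro ls
  induction ls with
  | nil => intro i d; rfl
  | cons l ls ih =>
    intro i d
    simp only [pvA_findEnd, pvB_findEnd]
    split
    · rfl
    · exact ih _ d

-- `no pattern of ps matches f`
def pvNoMatch : List String → String → Bool
  | [], _ => true
  | p :: ps, f => (!PySem.Str.startswith f p) && pvNoMatch ps f

-- the per-pattern segments of the reordered fields, as a list of lists
def pvSegs : List String → List String → List (List String)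
  | [], _ => []
  | p :: ps, fs =>
    fs.filter (fun f => PySem.Str.startswith f p) ::
      pvSegs ps (fs.filter (fun f => !PySem.Str.startswith f p))

-- zipSeg: what the final buckets are, given partially-filled buckets
def pvZipSeg : List (List String) → List String → List String → List (List String)
  | [], _, _ => []
  | b :: bs, [], _ => b :: pvZipSeg bs [] []
  | b :: bs, p :: ps, fs =>
    (b ++ fs.filter (fun f => PySem.Str.startswith f p)) ::
      pvZipSeg bs ps (fs.filter (fun f => !PySem.Str.startswith f p))

theorem pv_remove_first (f : String) : ∀ (l1 l2 : List String), (∀ x ∈ l1, x ≠ f) →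
    PySem.List.remove? (l1 ++ f :: l2) f = some (l1 ++ l2) := by
  intro l1
  induction l1 with
  | nil => intro l2 _; simp
  | cons x l1 ih =>
    intro l2 h
    have hx : x ≠ f := h x (by simp)
    rw [List.cons_append, List.cons_append, PySem.List.remove?_cons_of_ne _ hx,
      ih l2 (fun y hy => h y (by simp [hy]))]
    rfl

theorem pv_inner_spec (p : String) : ∀ (fs l1 ord : List String),
    (∀ x ∈ l1, PySem.Str.startswith x p = false) →
    pvA_inner p fs ord (l1 ++ fs) =
      (ord ++ fs.filter (fun f => PySem.Str.startswith f p),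
       l1 ++ fs.filter (fun f => !PySem.Str.startswith f p)) := by
  intro fs
  induction fs with
  | nil => intro l1 ord _; simp [pvA_inner]
  | cons f fs ih =>
    intro l1 ord h
    by_cases hf : PySem.Chars.startswith f.toList p.toList
    · have hfS : PySem.Str.startswith f p = true := by rw [PySem.Str.startswith_eq]; exact hf
      have hne : ∀ x ∈ l1, x ≠ f := by
        intro x hx hxf
        subst hxf
        rw [h x hx] at hfS
        exact Bool.false_ne_true hfS
      have hrem := pv_remove_first f l1 fs hne
      simp only [pvA_inner]
      rw [if_pos hfS, hrem, Option.getD_some, ih l1 (ord ++ [f]) h,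
        List.filter_cons_of_pos (by exact hfS),
        List.filter_cons_of_neg (by rw [hfS]; simp)]
      simp [List.append_assoc]
    · have hfS : PySem.Str.startswith f p = false := by
        rw [PySem.Str.startswith_eq]; exact Bool.of_not_eq_true hf
      simp only [pvA_inner]
      rw [if_neg (by rw [hfS]; exact Bool.false_ne_true),
        show l1 ++ f :: fs = (l1 ++ [f]) ++ fs by simp,
        ih (l1 ++ [f]) ord (by
          intro x hx
          rcases List.mem_append.mp hx with hx | hx
          · exact h x hx
          · simp at hx; subst hx; exact hfS),
        List.filter_cons_of_neg (by rw [hfS]; exact Bool.false_ne_true),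
        List.filter_cons_of_pos (by rw [hfS]; simp)]
      simp

theorem pv_outer_spec : ∀ (ps ord fs : List String),
    pvA_outer ps ord fs = (ord ++ (pvSegs ps fs).flatten, fs.filter (pvNoMatch ps)) := by
  intro ps
  induction ps with
  | nil =>
    intro ord fs
    simp [pvA_outer, pvSegs, pvNoMatch, List.filter_true]
  | cons p ps ih =>
    intro ord fs
    have hinner := pv_inner_spec p fs [] ord (by intro x hx; simp at hx)
    simp only [List.nil_append] at hinner
    simp only [pvA_outer, hinner, ih]
    simp only [pvSegs, pvNoMatch, List.flatten_cons, Prod.mk.injEq]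
    refine ⟨by simp [List.append_assoc], ?_⟩
    rw [List.filter_filter]
    apply List.filter_congr
    intro f _
    simp [Bool.and_comm]

-- firstIdx shifts its start index
theorem pv_firstIdx_shift : ∀ (ps : List String) (f : String) (k : Nat),
    pvB_firstIdx ps f (k + 1) = (pvB_firstIdx ps f k).map (· + 1) := by
  intro ps
  induction ps with
  | nil => intro f k; rfl
  | cons p ps ih =>
    intro f k
    by_cases h : PySem.Chars.startswith f.toList p.toList <;> simp [pvB_firstIdx, h, ih]

theorem pv_firstIdx_none_iff : ∀ (ps : List String) (f : String),
    (pvB_firstIdx ps f 0 = none ↔ pvNoMatch ps f = true) := by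
  intro ps
  induction ps with
  | nil => intro f; simp [pvB_firstIdx, pvNoMatch]
  | cons p ps ih =>
    intro f
    by_cases h : PySem.Chars.startswith f.toList p.toList <;>
      simp [pvB_firstIdx, pvNoMatch, h, pv_firstIdx_shift, ih]

theorem pv_zipSeg_skip : ∀ (ps : List String) (bks : List (List String)) (fs : List String) (f : String),
    pvNoMatch ps f = true → pvZipSeg bks ps (f :: fs) = pvZipSeg bks ps fs := by
  intro ps
  induction ps with
  | nil =>
    intro bks fs f _
    cases bks <;> rfl
  | cons p ps ih =>
    intro bks fs f h
    simp only [pvNoMatch, Bool.and_eq_true, Bool.not_eq_true'] at h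
    cases bks with
    | nil => rfl
    | cons b bs =>
      simp only [pvZipSeg, List.filter_cons, h.1]
      simp [ih bs _ f h.2]

theorem pv_zipSeg_add : ∀ (ps : List String) (j : Nat) (f : String) (bks : List (List String)) (fs : List String),
    bks.length = ps.length → pvB_firstIdx ps f 0 = some j →
    pvZipSeg (bks.set j (bks.getD j [] ++ [f])) ps fs = pvZipSeg bks ps (f :: fs) := by
  intro ps
  induction ps with
  | nil => intro j f bks fs _ h; simp [pvB_firstIdx] at h
  | cons p ps ih =>
    intro j f bks fs hlen h
    cases bks with
    | nil => simp at hlen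
    | cons b bs =>
      simp only [List.length_cons, Nat.succ_inj] at hlen
      by_cases hf : PySem.Chars.startswith f.toList p.toList
      · have hj : j = 0 := by simp [pvB_firstIdx, hf] at h; omega
        subst hj
        simp [pvZipSeg, hf, List.append_assoc]
      · have hj : pvB_firstIdx ps f 1 = some j := by simpa [pvB_firstIdx, hf] using h
        rw [show (1 : Nat) = 0 + 1 from rfl, pv_firstIdx_shift] at hj
        cases hq : pvB_firstIdx ps f 0 with
        | none => rw [hq] at hj; simp at hj
        | some j' =>
          rw [hq] at hj
          simp only [Option.map_some, Option.some_inj] at hj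
          subst hj
          simp only [List.set_cons_succ, List.getD_cons_succ, pvZipSeg]
          rw [List.filter_cons_of_neg (by simp [hf]), List.filter_cons_of_pos (by simp [hf]),
            ih j' f bs _ hlen hq]

theorem pv_zipSeg_nil_fields : ∀ (ps : List String) (bks : List (List String)),
    bks.length = ps.length → pvZipSeg bks ps [] = bks := by
  intro ps
  induction ps with
  | nil => intro bks h; rw [List.length_eq_zero_iff.mp h]; rfl
  | cons p ps ih =>
    intro bks h
    cases bks with
    | nil => simp at h
    | cons b bs =>
      simp only [List.length_cons, Nat.succ_inj] at h
      simp [pvZipSeg, ih bs h]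

theorem pv_group_spec (ps : List String) : ∀ (fs : List String) (bks : List (List String)) (unk : List String),
    bks.length = ps.length →
    pvB_group ps fs bks unk = (pvZipSeg bks ps fs, unk ++ fs.filter (pvNoMatch ps)) := by
  intro fs
  induction fs with
  | nil =>
    intro bks unk hlen
    simp [pvB_group, pv_zipSeg_nil_fields ps bks hlen]
  | cons f fs ih =>
    intro bks unk hlen
    cases h : pvB_firstIdx ps f 0 with
    | some j =>
      have hnm : pvNoMatch ps f = false := by
        cases hx : pvNoMatch ps f
        · rfl
        · rw [(pv_firstIdx_none_iff ps f).mpr hx] at h; simp at h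
      simp only [pvB_group, h]
      rw [ih _ unk (by simp [hlen])]
      rw [pv_zipSeg_add ps j f bks fs hlen h]
      simp [hnm]
    | none =>
      have hnm : pvNoMatch ps f = true := (pv_firstIdx_none_iff ps f).mp h
      simp only [pvB_group, h]
      rw [ih bks (unk ++ [f]) hlen]
      rw [pv_zipSeg_skip ps bks fs f hnm]
      simp [hnm]

theorem pv_zipSeg_empty : ∀ (ps fs : List String),
    pvZipSeg (List.replicate ps.length ([] : List String)) ps fs = pvSegs ps fs := by
  intro ps
  induction ps with
  | nil => intro fs; rfl
  | cons p ps ih => intro fs; simp [List.replicate_succ, pvZipSeg, pvSegs, ih]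

theorem pv_foldl_append : ∀ (l : List (List String)) (acc : List String),
    l.foldl (fun r b => r ++ b) acc = acc ++ l.flatten := by
  intro l
  induction l with
  | nil => intro acc; simp
  | cons b bs ih => intro acc; simp [ih, List.append_assoc]

theorem pv_findEnd_pos : ∀ (ls : List String) (i d : Nat), 1 ≤ i → 1 ≤ d → 1 ≤ pvA_findEnd ls i d := by
  intro ls
  induction ls with
  | nil => intro i d _ hd; simpa [pvA_findEnd]
  | cons l ls ih =>
    intro i d hi hd
    simp only [pvA_findEnd]
    split
    · exact hi
    · exact ih _ d (by omega) hd

-- ===== VERDICT (by name: the statement is the Claim_ definition above) =====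
theorem normalize_head_order_py_spec : Claim_equal_normalize_head_order_py := by
  intro lines _
  unfold Spec_normalize_head_order_py
  match lines with
  | [] => rfl
  | l0 :: rest =>
    simp only [normalize_head_order_py, normalize_head_order_py_alt]
    by_cases hg : PySem.Str.startswith l0 "0 HEAD"
    · simp only [hg, Bool.not_true, Bool.false_eq_true, if_false]
      rw [pv_findEnd_eq]
      set he := pvB_findEnd (PySem.List.slice (l0 :: rest) (some 1) none) 1 (l0 :: rest).length with hhe
      have hpos : 1 ≤ he := by
        rw [hhe, ← pv_findEnd_eq]
        exact pv_findEnd_pos _ 1 _ (by omega) (by simp)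
      obtain ⟨k, hk⟩ : ∃ k, he = k + 1 := ⟨he - 1, by omega⟩
      have hslice0 : PySem.List.slice (l0 :: rest) (some ((0 : Nat) : Int)) (some ((he : Nat) : Int))
          = l0 :: rest.take k := by
        rw [PySem.List.slice_natCast]
        simp [hk, List.take_succ_cons]
      rw [hslice0]
      have hfieldsB : PySem.List.slice (l0 :: rest) (some 1) (some ((he : Nat) : Int))
          = rest.take k := by
        rw [show (1 : Int) = ((1 : Nat) : Int) from by norm_num, PySem.List.slice_natCast]
        simp [hk]
      rw [hfieldsB]
      have hheadfields : PySem.List.slice (l0 :: rest.take k) (some 1) none = rest.take k := by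
        rw [show (1 : Int) = ((1 : Nat) : Int) from by norm_num, PySem.List.slice_from_natCast]
        simp
      rw [hheadfields]
      have hheadline : (PySem.List.pyGet? (l0 :: rest.take k) 0).getD "" = l0 := by
        simp
      rw [hheadline]
      have hpre : PySem.List.slice (l0 :: rest) none (some ((0 : Nat) : Int)) = [] := by
        rw [PySem.List.slice_to_natCast]; simp
      rw [hpre]
      rw [show pvPreferred.map (fun _ => ([] : List String))
            = List.replicate pvPreferred.length ([] : List String) from rfl]
      rw [pv_outer_spec, pv_group_spec pvPreferred _ _ _ (by simp)]
      rw [pv_zipSeg_empty, pv_foldl_append]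
      simp [List.append_assoc]
    · have hgc : PySem.Chars.startswith l0.toList ['0', ' ', 'H', 'E', 'A', 'D'] = false := by
        simp only [PySem.Str.startswith_eq] at hg
        exact Bool.of_not_eq_true hg
      simp [hgc]
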